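-- pv_equiv track=rewrite | github.com/sheraff0/CodeWars | 6_last_survivors.py | last_survivors
-- ===== SOURCE A (Python) =====
-- def replace(symbol):
--     return chr((ord(symbol) - 97 + 1) % 26 + 97)
--
-- def last_survivors(string):
--     res = [*string]
--     while True:
--         len_0 = len_ = len(res)
--         i = 0
--         while i < len_ - 1:
--             j = i + 1
--             while j < len_:
--                 if res[i] == res[j]:
--                     symbol = res.pop(j)
--                     res[i] = replace(symbol)
--                     len_ -= 1
--                 else:
--                     j += 1
--             i += 1
--         if len_0 == len_:
--             return ''.join(res)
-- ===== SOURCE B (Python) =====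
-- def replace(symbol):
--     return chr((ord(symbol) - 97 + 1) % 26 + 97)
--
-- def scan(c, tail):
--     # one left-to-right sweep: drop every element equal to the current c,
--     # cyclically incrementing c at each drop; keep the rest in order
--     kept = []
--     for x in tail:
--         if x == c:
--             c = replace(x)
--         else:
--             kept.append(x)
--     return c, kept
--
-- def last_survivors(string):
--     res = list(string)
--     while True:
--         out = []
--         rest = res
--         while rest:
--             c, rest = scan(rest[0], rest[1:])
--             out.append(c)
--         if len(out) == len(res):
--             return ''.join(out)
--         res = out
-- ===== Notes on version B (the rewrite author's own statement) =====
-- stated objective: alternative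
-- what changed: A mutates one shared list in place with three nested index loops and O(n) pops; B rebuilds the list functionally, one per-position sweep (keep non-matches, cyclically bump the pivot on each match) repeated to a fixpoint, with no index arithmetic or in-place mutation.
import Mathlib
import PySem

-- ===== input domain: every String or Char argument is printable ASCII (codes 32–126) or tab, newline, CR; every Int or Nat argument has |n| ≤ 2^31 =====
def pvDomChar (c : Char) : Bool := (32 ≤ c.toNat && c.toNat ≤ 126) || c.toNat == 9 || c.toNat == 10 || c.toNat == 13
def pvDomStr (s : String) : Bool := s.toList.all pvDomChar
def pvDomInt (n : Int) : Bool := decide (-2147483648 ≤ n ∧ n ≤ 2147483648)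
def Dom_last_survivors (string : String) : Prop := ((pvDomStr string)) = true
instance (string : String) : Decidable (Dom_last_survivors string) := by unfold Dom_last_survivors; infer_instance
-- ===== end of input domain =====

-- B replaces A's in-place triple nested index loop with pops by a functional per-position
-- sweep that rebuilds the list (objective: alternative decomposition; return value only).
-- Loops are guarded by a fuel parameter for totality only; the supplied fuel always suffices.

-- ===== PORT A =====
-- replace(symbol): chr((ord(symbol)-97+1) % 26 + 97); divisor 26 > 0, so Python's % = Int.emod
def replaceA (symbol : Char) : Char :=
  Char.ofNat (((symbol.toNat : Int) - 97 + 1).emod 26 + 97).toNat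

-- inner 'while j < len_' loop of A; res[i]/res[j] are in range when read (i < j < len);
-- res.pop(j) = take j ++ drop (j+1); each step decreases len-j, so fuel > len-j suffices
def innerA : Nat → List Char → Nat → Nat → List Char
  | 0, res, _, _ => res
  | fuel+1, res, i, j =>
    if j < res.length then
      if res.getD i ' ' = res.getD j ' ' then
        innerA fuel ((res.take j ++ res.drop (j+1)).set i (replaceA (res.getD j ' '))) i j
      else innerA fuel res i (j+1)
    else res

-- middle 'while i < len_ - 1' loop of A
def middleA : Nat → List Char → Nat → List Char
  | 0, res, _ => res
  | fuel+1, res, i =>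
    if i < res.length - 1 then middleA fuel (innerA (res.length + 1) res i (i+1)) (i+1)
    else res

-- outer 'while True' loop of A: one full pass, return when the length is unchanged
def outerA : Nat → List Char → List Char
  | 0, res => res
  | fuel+1, res =>
    let res' := middleA res.length res 0
    if res'.length = res.length then res' else outerA fuel res'

def last_survivors (string : String) : String :=
  String.ofList (outerA (string.toList.length + 1) string.toList)

-- ===== PORT B =====
-- scan(c, tail): one sweep keeping non-matches, cyclically bumping c on each match
def scanB (c : Char) (kept : List Char) : List Char → Char × List Char
  | [] => (c, kept)
  | x :: xs => if x = c then scanB (replaceA x) kept xs else scanB c (kept ++ [x]) xs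

-- the inner 'while rest' loop of B's pass; rest strictly shrinks, fuel ≥ length suffices
def passB : Nat → List Char → List Char
  | 0, _ => []
  | _+1, [] => []
  | fuel+1, x :: xs =>
    let p := scanB x [] xs
    p.1 :: passB fuel p.2

-- outer 'while True' loop of B
def outerB : Nat → List Char → List Char
  | 0, res => res
  | fuel+1, res =>
    let out := passB res.length res
    if out.length = res.length then out else outerB fuel out

def last_survivors_alt (string : String) : String :=
  String.ofList (outerB (string.toList.length + 1) string.toList)

-- ===== PRECONDITION & SPEC =====
def Spec_last_survivors (string : String) (out : String) : Prop := out = last_survivors_alt string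
instance (string : String) (out : String) : Decidable (Spec_last_survivors string out) := by unfold Spec_last_survivors; infer_instance

-- ===== CLAIM (what is proved, stated in full; the proofs are below) =====
def Claim_equal_last_survivors : Prop := ∀ (string : String), Dom_last_survivors string → Spec_last_survivors string (last_survivors string)

-- ===== LEMMAS AND PROOFS =====

theorem scanB_length_le (c : Char) (kept tail : List Char) :
    (scanB c kept tail).2.length ≤ kept.length + tail.length := by
  induction tail generalizing c kept with
  | nil => simp [scanB]
  | cons x xs ih =>
      rw [scanB]
      split
      · have := ih (replaceA x) kept
        simp only [List.length_cons]; omega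
      · have := ih c (kept ++ [x])
        simp only [List.length_append, List.length_cons, List.length_nil] at this ⊢
        omega

theorem passB_length_le (fuel : Nat) : ∀ (l : List Char), (passB fuel l).length ≤ l.length := by
  induction fuel with
  | zero => intro l; simp [passB]
  | succ f ih =>
      intro l
      match l with
      | [] => simp [passB]
      | x :: xs =>
          rw [passB]
          have h1 := scanB_length_le x [] xs
          have h2 := ih (scanB x [] xs).2
          simp only [List.length_nil, Nat.zero_add] at h1
          simp only [List.length_cons]
          omega

theorem getD_append_mid (pre l : List Char) (k : Nat) (d : Char) :
    (pre ++ l).getD (pre.length + k) d = l.getD k d := by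
  unfold List.getD
  rw [List.getElem?_append_right (by omega)]
  simp

-- res.pop(j) followed by res[i] = d, for res = pre ++ c :: kept ++ x :: rs, i = |pre|, j = i+1+|kept|
theorem pop_set_mid (pre kept rs : List Char) (c x d : Char) :
    ((pre ++ c :: kept ++ x :: rs).take (pre.length + 1 + kept.length) ++
     (pre ++ c :: kept ++ x :: rs).drop (pre.length + 1 + kept.length + 1)).set pre.length d
    = pre ++ d :: kept ++ rs := by
  have e1 : (pre ++ c :: kept ++ x :: rs).take (pre.length + 1 + kept.length) = pre ++ c :: kept := by
    have h1 : pre ++ c :: kept ++ x :: rs = (pre ++ c :: kept) ++ x :: rs := by simp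
    have h2 : pre.length + 1 + kept.length = (pre ++ c :: kept).length := by simp; omega
    rw [h1, h2, List.take_left]
  have e2 : (pre ++ c :: kept ++ x :: rs).drop (pre.length + 1 + kept.length + 1) = rs := by
    have h1 : pre ++ c :: kept ++ x :: rs = (pre ++ c :: kept ++ [x]) ++ rs := by simp
    have h2 : pre.length + 1 + kept.length + 1 = (pre ++ c :: kept ++ [x]).length := by simp; omega
    rw [h1, h2, List.drop_left]
  rw [e1, e2]
  have h3 : (pre ++ c :: kept) ++ rs = pre ++ c :: (kept ++ rs) := by simp
  rw [h3, List.set_append]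
  simp

theorem inner_eq_scan (rem : List Char) : ∀ (fuel : Nat) (kept pre : List Char) (c : Char),
    rem.length < fuel →
    innerA fuel (pre ++ c :: kept ++ rem) pre.length (pre.length + 1 + kept.length)
      = pre ++ (scanB c kept rem).1 :: (scanB c kept rem).2 := by
  induction rem with
  | nil =>
      intro fuel kept pre c hf
      match fuel with
      | f + 1 =>
        rw [innerA, scanB]
        have h : ¬ (pre.length + 1 + kept.length < (pre ++ c :: kept ++ ([] : List Char)).length) := by
          simp only [List.length_append, List.length_cons, List.append_nil]; omega
        rw [if_neg h]
        simp
  | cons x rs ih =>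
      intro fuel kept pre c hf
      match fuel with
      | f + 1 =>
        rw [innerA]
        have hlen : pre.length + 1 + kept.length < (pre ++ c :: kept ++ x :: rs).length := by
          simp only [List.length_append, List.length_cons]; omega
        rw [if_pos hlen]
        have hi : (pre ++ c :: kept ++ x :: rs).getD pre.length ' ' = c := by
          simp
        have hj : (pre ++ c :: kept ++ x :: rs).getD (pre.length + 1 + kept.length) ' ' = x := by
          have h1 : pre.length + 1 + kept.length = pre.length + (kept.length + 1) := by omega
          have hl : pre ++ c :: kept ++ x :: rs = pre ++ (c :: (kept ++ x :: rs)) := by simp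
          rw [hl, h1, getD_append_mid pre (c :: (kept ++ x :: rs)) (kept.length + 1),
              List.getD_cons_succ,
              show (kept.length : Nat) = kept.length + 0 from rfl,
              getD_append_mid kept (x :: rs) 0]
          rfl
        simp only [hi, hj]
        by_cases hxc : c = x
        · rw [if_pos hxc]
          subst hxc
          rw [pop_set_mid, ih f kept pre (replaceA c) (by simp at hf; omega)]
          rw [scanB, if_pos rfl]
        · rw [if_neg hxc]
          have hres : pre ++ c :: kept ++ x :: rs = pre ++ c :: (kept ++ [x]) ++ rs := by simp
          have hidx : pre.length + 1 + kept.length + 1 = pre.length + 1 + (kept ++ [x]).length := by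
            simp; omega
          rw [hres, hidx, ih f (kept ++ [x]) pre c (by simp at hf ⊢; omega)]
          rw [scanB, if_neg (fun h => hxc h.symm)]

theorem middle_eq_pass (n : Nat) : ∀ (rest pre : List Char) (mfuel pfuel : Nat),
    rest.length ≤ n → rest.length ≤ mfuel → rest.length ≤ pfuel →
    middleA mfuel (pre ++ rest) pre.length = pre ++ passB pfuel rest := by
  induction n with
  | zero =>
      intro rest pre mfuel pfuel h _ _
      have : rest = [] := List.eq_nil_of_length_eq_zero (by omega)
      subst this
      match mfuel, pfuel with
      | 0, 0 => rw [middleA, passB]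
      | 0, _ + 1 => rw [middleA, passB]
      | _ + 1, 0 =>
          rw [middleA, if_neg (by simp), passB]
      | _ + 1, _ + 1 =>
          rw [middleA, if_neg (by simp), passB]
  | succ n ih =>
      intro rest pre mfuel pfuel h hm hp
      match rest with
      | [] =>
          match mfuel, pfuel with
          | 0, 0 => rw [middleA, passB]
          | 0, _ + 1 => rw [middleA, passB]
          | _ + 1, 0 => rw [middleA, if_neg (by simp), passB]
          | _ + 1, _ + 1 => rw [middleA, if_neg (by simp), passB]
      | [c] =>
          match mfuel, pfuel with
          | _, 0 => simp at hp
          | 0, pf + 1 => rw [middleA, passB]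
                         rw [show scanB c [] [] = (c, []) from rfl]
                         match pf with
                         | 0 => rw [passB]
                         | _ + 1 => rw [passB]
          | mf + 1, pf + 1 =>
              rw [middleA, if_neg (by simp), passB]
              rw [show scanB c [] [] = (c, []) from rfl]
              match pf with
              | 0 => rw [passB]
              | _ + 1 => rw [passB]
      | c :: t :: ts =>
          match mfuel, pfuel with
          | 0, _ => simp at hm
          | _, 0 => simp at hp
          | mf + 1, pf + 1 =>
              rw [middleA, if_pos (by simp only [List.length_append, List.length_cons]; omega)]
              have h1 : pre ++ c :: t :: ts = pre ++ c :: [] ++ (t :: ts) := by simp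
              rw [h1]
              rw [show pre.length + 1 = pre.length + 1 + ([] : List Char).length by simp]
              rw [inner_eq_scan (t :: ts) ((pre ++ [c] ++ t :: ts).length + 1) [] pre c
                    (by simp only [List.length_append, List.length_cons]; omega)]
              have h4 : pre ++ (scanB c [] (t :: ts)).1 :: (scanB c [] (t :: ts)).2
                  = (pre ++ [(scanB c [] (t :: ts)).1]) ++ (scanB c [] (t :: ts)).2 := by simp
              have h5 : pre.length + 1 + ([] : List Char).length = (pre ++ [(scanB c [] (t :: ts)).1]).length := by simp
              have hscan := scanB_length_le c [] (t :: ts)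
              simp only [List.length_nil, Nat.zero_add, List.length_cons] at hscan
              rw [h4, h5, ih (scanB c [] (t :: ts)).2 (pre ++ [(scanB c [] (t :: ts)).1]) mf pf
                    (by simp only [List.length_cons] at h; omega)
                    (by simp only [List.length_cons] at hm; omega)
                    (by simp only [List.length_cons] at hp; omega)]
              rw [passB]
              simp

theorem middle_zero_eq_pass (res : List Char) :
    middleA res.length res 0 = passB res.length res := by
  have := middle_eq_pass res.length res [] res.length res.length le_rfl le_rfl le_rfl
  simpa using this

theorem outer_eq_aux (n : Nat) : ∀ (res : List Char) (af bf : Nat),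
    res.length ≤ n → res.length < af → res.length < bf →
    outerA af res = outerB bf res := by
  induction n with
  | zero =>
      intro res af bf h ha hb
      have : res = [] := List.eq_nil_of_length_eq_zero (by omega)
      subst this
      match af, bf with
      | a + 1, b + 1 =>
        rw [outerA, outerB, middle_zero_eq_pass]
        simp [passB]
  | succ n ih =>
      intro res af bf h ha hb
      match af, bf with
      | a + 1, b + 1 =>
        rw [outerA, outerB, middle_zero_eq_pass]
        by_cases hl : (passB res.length res).length = res.length
        · rw [if_pos hl, if_pos hl]
        · rw [if_neg hl, if_neg hl]
          have hle := passB_length_le res.length res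
          exact ih (passB res.length res) a b (by omega) (by omega) (by omega)

theorem outer_eq (l : List Char) : outerA (l.length + 1) l = outerB (l.length + 1) l :=
  outer_eq_aux l.length l (l.length + 1) (l.length + 1) le_rfl (by omega) (by omega)

-- ===== VERDICT (by name: the statement is the Claim_ definition above) =====
theorem last_survivors_spec : Claim_equal_last_survivors := by
  intro s _
  unfold Spec_last_survivors last_survivors last_survivors_alt
  rw [outer_eq]
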